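-- pv_equiv track=rewrite | github.com/talnoam/TicTacToe | game_functions.py | score_ideces
-- ===== SOURCE A (Python) =====
-- def score_ideces(scores):
--
--   indecesy3 = []
--   indecesx3 = []
--   indecesx2 = []
--   indecesx1 = []
--   indecesy2 = []
--   indecesy1 = []
--   for i in range(len(scores[0])):
--
--     for j in range(len(scores[0][i])):
--
--       if scores[0][i][j] == 2:
--         index = (i, j)
--         if scores[1][i][j] == 0:
--           indecesx2.append(index)
--         else:
--           continue
--
--       elif scores[0][i][j] == 1:
--         index = (i, j)
--         if scores[1][i][j] == 0:
--           indecesx1.append(index)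
--         else:
--           continue
--
--       elif scores[1][i][j] == 2:
--         index = (i, j)
--         if scores[0][i][j] == 0:
--           indecesy2.append(index)
--         else:
--           continue
--
--       elif scores[1][i][j] == 1:
--         index = (i, j)
--         if scores[0][i][j] == 0:
--           indecesy1.append(index)
--         else:
--           continue
--
--       elif scores[0][i][j] == 0:
--         index = (i, j)
--         if scores[1][i][j] == 0:
--           indecesx3.append(index)
--         else:
--           continue
--
--       elif scores[1][i][j] == 0:
--         index = (i, j)
--         if scores[0][i][j] == 0:
--           indecesy3.append(index)
--         else:
--           continue
--
--
--     scoresx = {'1': indecesx1, '2': indecesx2, '0': indecesx3}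
--     scoresy = {'1': indecesy1, '2': indecesy2, '0': indecesy3}
--
--   return scoresx, scoresy
-- ===== SOURCE B (Python) =====
-- def score_ideces(scores):
--     cells = [(i, j) for i in range(len(scores[0])) for j in range(len(scores[0][i]))]
--     def pick(a, b):
--         return [ij for ij in cells
--                 if scores[0][ij[0]][ij[1]] == a and scores[1][ij[0]][ij[1]] == b]
--     scoresx = {'1': pick(1, 0), '2': pick(2, 0), '0': pick(0, 0)}
--     scoresy = {'1': pick(0, 1), '2': pick(0, 2), '0': []}
--     return scoresx, scoresy
-- ===== Notes on version B (the rewrite author's own statement) =====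
-- stated objective: simpler
-- what changed: A's single pass with a six-way elif cascade mutating six bucket lists is replaced by staged passes: the cell index list is built once and each bucket is an independent filtering comprehension over it with its own (score0,score1) pair; no mutable accumulators, no cascade, no always-empty y3 bucket.
import Mathlib
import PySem

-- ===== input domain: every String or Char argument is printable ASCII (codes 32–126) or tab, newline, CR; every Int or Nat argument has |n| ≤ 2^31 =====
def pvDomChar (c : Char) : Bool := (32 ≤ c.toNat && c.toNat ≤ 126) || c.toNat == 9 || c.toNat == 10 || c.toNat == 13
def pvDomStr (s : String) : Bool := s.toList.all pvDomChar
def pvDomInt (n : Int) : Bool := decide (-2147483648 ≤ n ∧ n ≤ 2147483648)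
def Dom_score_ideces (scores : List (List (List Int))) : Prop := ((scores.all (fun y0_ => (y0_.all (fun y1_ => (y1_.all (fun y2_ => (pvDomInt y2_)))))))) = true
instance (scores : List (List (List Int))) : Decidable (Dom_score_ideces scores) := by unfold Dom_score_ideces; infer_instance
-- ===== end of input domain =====

-- B replaces A's single pass with a six-way elif cascade mutating six buckets by staged passes: a cell list
-- built once, then one independent filtering pass per bucket. Simpler decomposition, same cost.

-- ===== PORT A =====
-- A's scores[k][i][j] read (in range under Pre_)
def pvAt (g : List (List Int)) (i j : Int) : Int :=
  PySem.List.pyGetD (PySem.List.pyGetD g i []) j 0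

-- the body of A's inner loop: the six-way elif cascade; state = (y3, x3, x2, x1, y2, y1) in A's declaration order
def pvStepA (st : List (Int × Int) × List (Int × Int) × List (Int × Int) × List (Int × Int) × List (Int × Int) × List (Int × Int))
    (idx : Int × Int) (a b : Int) :
    List (Int × Int) × List (Int × Int) × List (Int × Int) × List (Int × Int) × List (Int × Int) × List (Int × Int) :=
  match st with
  | (y3, x3, x2, x1, y2, y1) =>
    if a = 2 then (if b = 0 then (y3, x3, x2 ++ [idx], x1, y2, y1) else (y3, x3, x2, x1, y2, y1))
    else if a = 1 then (if b = 0 then (y3, x3, x2, x1 ++ [idx], y2, y1) else (y3, x3, x2, x1, y2, y1))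
    else if b = 2 then (if a = 0 then (y3, x3, x2, x1, y2 ++ [idx], y1) else (y3, x3, x2, x1, y2, y1))
    else if b = 1 then (if a = 0 then (y3, x3, x2, x1, y2, y1 ++ [idx]) else (y3, x3, x2, x1, y2, y1))
    else if a = 0 then (if b = 0 then (y3, x3 ++ [idx], x2, x1, y2, y1) else (y3, x3, x2, x1, y2, y1))
    else if b = 0 then (if a = 0 then (y3 ++ [idx], x3, x2, x1, y2, y1) else (y3, x3, x2, x1, y2, y1))
    else (y3, x3, x2, x1, y2, y1)

-- A: the scoresx/scoresy dicts assigned on each outer pass alias the (mutated) bucket lists, so the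
-- returned dicts hold the final lists; the port builds them from the final fold state.
def score_ideces (scores : List (List (List Int))) : (List (String × List (Int × Int))) × (List (String × List (Int × Int))) :=
  match
    (PySem.List.pyRange 0 (PySem.List.len (PySem.List.pyGetD scores 0 [])) 1).foldl
      (fun st i =>
        (PySem.List.pyRange 0 (PySem.List.len (PySem.List.pyGetD (PySem.List.pyGetD scores 0 []) i [])) 1).foldl
          (fun st j => pvStepA st (i, j) (pvAt (PySem.List.pyGetD scores 0 []) i j) (pvAt (PySem.List.pyGetD scores 1 []) i j))
          st)
      (([], [], [], [], [], []))
  with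
  | (y3, x3, x2, x1, y2, y1) =>
    ([("1", x1), ("2", x2), ("0", x3)], [("1", y1), ("2", y2), ("0", y3)])

-- ===== PORT B =====
-- cells = [(i, j) for i in range(len(scores[0])) for j in range(len(scores[0][i]))]
def pvCells (g0 : List (List Int)) : List (Int × Int) :=
  (PySem.List.pyRange 0 (PySem.List.len g0) 1).flatMap
    (fun i => (PySem.List.pyRange 0 (PySem.List.len (PySem.List.pyGetD g0 i [])) 1).map (fun j => (i, j)))

-- pick(a, b): one filtering pass over the cell list
def pvPick (g0 g1 : List (List Int)) (cells : List (Int × Int)) (a b : Int) : List (Int × Int) :=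
  cells.filter (fun ij => decide (pvAt g0 ij.1 ij.2 = a) && decide (pvAt g1 ij.1 ij.2 = b))

def score_ideces_alt (scores : List (List (List Int))) : (List (String × List (Int × Int))) × (List (String × List (Int × Int))) :=
  let g0 := PySem.List.pyGetD scores 0 []
  let g1 := PySem.List.pyGetD scores 1 []
  let cells := pvCells g0
  (([("1", pvPick g0 g1 cells 1 0), ("2", pvPick g0 g1 cells 2 0), ("0", pvPick g0 g1 cells 0 0)]),
   ([("1", pvPick g0 g1 cells 0 1), ("2", pvPick g0 g1 cells 0 2), ("0", ([] : List (Int × Int)))]))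

-- ===== PRECONDITION & SPEC =====
-- Pre_ = exactly the inputs where Python A returns: a nonempty first grid (else UnboundLocalError: scoresx is
-- only assigned inside the loop), and, whenever a row of grid 0 is nonempty (a cell is visited), a second grid
-- whose row i covers it (else IndexError on scores[1][i][j]).
def Pre_score_ideces (scores : List (List (List Int))) : Prop :=
  scores.getD 0 [] ≠ [] ∧
  ∀ i < (scores.getD 0 []).length, 0 < ((scores.getD 0 []).getD i []).length →
    (2 ≤ scores.length ∧ i < (scores.getD 1 []).length ∧ ((scores.getD 0 []).getD i []).length ≤ ((scores.getD 1 []).getD i []).length)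
instance (scores : List (List (List Int))) : Decidable (Pre_score_ideces scores) := by unfold Pre_score_ideces; infer_instance

def pvWitness_score_ideces : List (List (List Int)) := [[[2, 0], [1, 3]], [[0, 1], [0, 2]]]

def Spec_score_ideces (scores : List (List (List Int))) (out : (List (String × List (Int × Int))) × (List (String × List (Int × Int)))) : Prop := out = score_ideces_alt scores
instance (scores : List (List (List Int))) (out : (List (String × List (Int × Int))) × (List (String × List (Int × Int)))) : Decidable (Spec_score_ideces scores out) := by unfold Spec_score_ideces; infer_instance

-- ===== CLAIM (what is proved, stated in full; the proofs are below) =====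
def Claim_equal_score_ideces : Prop := ∀ (scores : List (List (List Int))), Dom_score_ideces scores → Pre_score_ideces scores → Spec_score_ideces scores (score_ideces scores)

-- ===== LEMMAS AND PROOFS =====

-- one cascade step, rewritten as "append to each bucket iff its (a,b) condition holds"
lemma stepA_filter (idx : Int × Int) (a b : Int)
    (y3 x3 x2 x1 y2 y1 : List (Int × Int)) :
    pvStepA (y3, x3, x2, x1, y2, y1) idx a b =
      (y3,
       x3 ++ (if a = 0 ∧ b = 0 then [idx] else []),
       x2 ++ (if a = 2 ∧ b = 0 then [idx] else []),
       x1 ++ (if a = 1 ∧ b = 0 then [idx] else []),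
       y2 ++ (if a = 0 ∧ b = 2 then [idx] else []),
       y1 ++ (if a = 0 ∧ b = 1 then [idx] else [])) := by
  unfold pvStepA
  by_cases ha2 : a = 2 <;> by_cases ha1 : a = 1 <;> by_cases ha0 : a = 0 <;>
    by_cases hb2 : b = 2 <;> by_cases hb1 : b = 1 <;> by_cases hb0 : b = 0 <;>
    simp_all

-- A's fold over any cell list = each bucket grows by that list's filter (B's pick)
lemma foldA_filter (g0 g1 : List (List Int)) (l : List (Int × Int))
    (y3 x3 x2 x1 y2 y1 : List (Int × Int)) :
    l.foldl (fun st ij => pvStepA st ij (pvAt g0 ij.1 ij.2) (pvAt g1 ij.1 ij.2))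
        (y3, x3, x2, x1, y2, y1) =
      (y3, x3 ++ pvPick g0 g1 l 0 0, x2 ++ pvPick g0 g1 l 2 0, x1 ++ pvPick g0 g1 l 1 0,
       y2 ++ pvPick g0 g1 l 0 2, y1 ++ pvPick g0 g1 l 0 1) := by
  induction l generalizing y3 x3 x2 x1 y2 y1 with
  | nil => simp [pvPick]
  | cons ij rest ih =>
    simp only [List.foldl_cons, stepA_filter, ih, pvPick, List.filter_cons]
    by_cases ha2 : pvAt g0 ij.1 ij.2 = 2 <;> by_cases ha1 : pvAt g0 ij.1 ij.2 = 1 <;>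
      by_cases ha0 : pvAt g0 ij.1 ij.2 = 0 <;>
      by_cases hb2 : pvAt g1 ij.1 ij.2 = 2 <;> by_cases hb1 : pvAt g1 ij.1 ij.2 = 1 <;>
      by_cases hb0 : pvAt g1 ij.1 ij.2 = 0 <;>
      simp_all

-- A's nested range loops = one fold over B's flattened cell list
lemma nested_eq_cells (g0 g1 : List (List Int)) (is : List Int)
    (st : List (Int × Int) × List (Int × Int) × List (Int × Int) × List (Int × Int) × List (Int × Int) × List (Int × Int)) :
    is.foldl
        (fun st i =>
          (PySem.List.pyRange 0 (PySem.List.len (PySem.List.pyGetD g0 i [])) 1).foldl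
            (fun st j => pvStepA st (i, j) (pvAt g0 i j) (pvAt g1 i j)) st)
        st =
      (is.flatMap (fun i => (PySem.List.pyRange 0 (PySem.List.len (PySem.List.pyGetD g0 i [])) 1).map (fun j => (i, j)))).foldl
        (fun st ij => pvStepA st ij (pvAt g0 ij.1 ij.2) (pvAt g1 ij.1 ij.2)) st := by
  induction is generalizing st with
  | nil => rfl
  | cons i rest ih =>
    simp only [List.flatMap_cons, List.foldl_cons, List.foldl_append, List.foldl_map]
    exact ih _

lemma ports_eq (scores : List (List (List Int))) : score_ideces scores = score_ideces_alt scores := by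
  unfold score_ideces score_ideces_alt pvCells
  rw [nested_eq_cells, foldA_filter]
  simp

-- ===== VERDICT (by name: the statement is the Claim_ definition above) =====
theorem score_ideces_spec : Claim_equal_score_ideces := by
  intro scores _ _
  unfold Spec_score_ideces
  exact ports_eq scores
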